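-- pv_equiv track=rewrite | github.com/ODCS1/PersonalTechStudies | python/exercicios/lista8/ex11.py | posicao_mais_a_esquerda_for
-- ===== SOURCE A (Python) =====
-- def posicao_mais_a_esquerda_for(tupla_numeros: tuple[int], numeros_procurados: tuple[int]) -> int:
--     if not (isinstance(tupla_numeros, tuple) and (isinstance(numeros_procurados, tuple))):
--         raise ValueError
--     posicao = -1
--     for i in range(len(tupla_numeros)):
--         if tupla_numeros[i] in numeros_procurados:
--             posicao = i
--             break
--     return posicao
-- ===== SOURCE B (Python) =====
-- def posicao_mais_a_esquerda_for(tupla_numeros: tuple, numeros_procurados: tuple) -> int: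
--     if not (isinstance(tupla_numeros, tuple) and (isinstance(numeros_procurados, tuple))):
--         raise ValueError
--     first = {}
--     for i, v in enumerate(tupla_numeros):
--         if v not in first:
--             first[v] = i
--     return min((first[x] for x in numeros_procurados if x in first), default=-1)
-- ===== Notes on version B (the rewrite author's own statement) =====
-- stated objective: alternative
-- what changed: Instead of scanning positions left-to-right with an inner 'in'-tuple membership test and an early break, B builds a value-to-first-index dict of the data in one pass and returns the minimum of the searched values' indices with default -1, removing the inner scan.
import Mathlib
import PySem

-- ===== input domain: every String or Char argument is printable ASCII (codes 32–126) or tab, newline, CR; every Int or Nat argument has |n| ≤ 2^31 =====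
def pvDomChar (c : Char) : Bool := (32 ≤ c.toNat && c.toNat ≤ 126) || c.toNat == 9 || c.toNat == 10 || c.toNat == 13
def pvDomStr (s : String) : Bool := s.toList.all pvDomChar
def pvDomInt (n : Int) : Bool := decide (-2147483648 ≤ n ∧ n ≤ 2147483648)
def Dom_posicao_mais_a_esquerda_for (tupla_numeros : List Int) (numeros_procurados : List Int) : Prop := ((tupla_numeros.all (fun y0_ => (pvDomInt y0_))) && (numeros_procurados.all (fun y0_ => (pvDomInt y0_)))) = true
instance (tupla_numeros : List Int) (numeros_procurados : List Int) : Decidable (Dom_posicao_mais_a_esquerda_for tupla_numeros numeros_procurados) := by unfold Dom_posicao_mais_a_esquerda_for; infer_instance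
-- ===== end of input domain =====

-- B replaces A's left-to-right position scan (with break) by building a value -> first-index dict
-- of the data in one pass and taking the minimum of the searched values' indices (default -1).
-- (The Python-level isinstance/ValueError guard concerns argument *types* only and has no counterpart
-- under the List Int convention; both ports are total.)

-- ===== PORT A =====
-- the 'for i in range(len(...))' loop with break, as structural recursion over the suffix with the running index i
def pvScanA (numeros_procurados : List Int) : List Int → Int → Int
  | [], _ => -1
  | x :: rest, i => if x ∈ numeros_procurados then i else pvScanA numeros_procurados rest (i + 1)

def posicao_mais_a_esquerda_for (tupla_numeros : List Int) (numeros_procurados : List Int) : Int :=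
  pvScanA numeros_procurados tupla_numeros 0

-- ===== PORT B =====
-- first = {}; for i, v in enumerate(tupla_numeros): if v not in first: first[v] = i
def pvFirstIndex (tupla_numeros : List Int) : PySem.Dict Int Int :=
  (PySem.List.enumerate tupla_numeros).foldl
    (fun first p => if first.contains p.2 then first else first.insert p.2 p.1) PySem.Dict.empty

-- min((first[x] for x in numeros_procurados if x in first), default=-1)
def posicao_mais_a_esquerda_for_alt (tupla_numeros : List Int) (numeros_procurados : List Int) : Int :=
  let first := pvFirstIndex tupla_numeros
  let positions := numeros_procurados.filterMap (fun x => first.get? x)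
  match PySem.List.min? positions (fun y => y) with
  | some m => m
  | none => -1

-- ===== PRECONDITION & SPEC =====
def Spec_posicao_mais_a_esquerda_for (tupla_numeros : List Int) (numeros_procurados : List Int) (out : Int) : Prop := out = posicao_mais_a_esquerda_for_alt tupla_numeros numeros_procurados
instance (tupla_numeros : List Int) (numeros_procurados : List Int) (out : Int) : Decidable (Spec_posicao_mais_a_esquerda_for tupla_numeros numeros_procurados out) := by unfold Spec_posicao_mais_a_esquerda_for; infer_instance

-- ===== CLAIM (what is proved, stated in full; the proofs are below) =====
def Claim_equal_posicao_mais_a_esquerda_for : Prop := ∀ (tupla_numeros : List Int) (numeros_procurados : List Int), Dom_posicao_mais_a_esquerda_for tupla_numeros numeros_procurados → Spec_posicao_mais_a_esquerda_for tupla_numeros numeros_procurados (posicao_mais_a_esquerda_for tupla_numeros numeros_procurados)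

-- ===== LEMMAS AND PROOFS =====
theorem scanA_eq (s t : List Int) (i : Int) :
    pvScanA s t i = (match t.findIdx? (fun x => decide (x ∈ s)) with
      | some k => i + k
      | none => -1) := by
  induction t generalizing i with
  | nil => simp [pvScanA]
  | cons a r ih =>
    simp only [pvScanA, List.findIdx?_cons]
    by_cases h : a ∈ s
    · simp [h]
    · simp only [h, decide_false, ih (i + 1)]
      cases hr : r.findIdx? (fun x => decide (x ∈ s)) <;> simp <;> push_cast <;> ring

theorem foldl_min_map_add (r : List Int) (x : Int) :
    (r.map (· + 1)).foldl min (x + 1) = r.foldl min x + 1 := by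
  induction r generalizing x with
  | nil => simp
  | cons b t ih =>
    have h : min (x + 1) (b + 1) = min x b + 1 := by omega
    simp only [List.map_cons, List.foldl_cons, h, ih]

theorem min?_map_add_one (l : List Int) :
    PySem.List.min? (l.map (· + 1)) (fun y => y) = (PySem.List.min? l (fun y => y)).map (· + 1) := by
  cases l with
  | nil => simp [PySem.List.min?]
  | cons x t => simp [PySem.List.min?_id_cons, foldl_min_map_add]

theorem positions_nonneg (t s : List Int) :
    ∀ m ∈ s.filterMap (fun x => (PySem.List.index? t x).map (fun n => (n : Int))), 0 ≤ m := by
  intro m hm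
  obtain ⟨x, _, hx⟩ := List.mem_filterMap.1 hm
  cases hi : PySem.List.index? t x with
  | none => rw [hi] at hx; simp at hx
  | some n => rw [hi] at hx; simp at hx; omega

theorem min_positions_eq (t s : List Int) :
    (match PySem.List.min? (s.filterMap (fun x => (PySem.List.index? t x).map (fun n => (n : Int)))) (fun y => y) with
      | some m => m
      | none => (-1 : Int)) = (match t.findIdx? (fun x => decide (x ∈ s)) with
      | some k => (k : Int)
      | none => -1) := by
  induction t with
  | nil =>
    simp [PySem.List.index?_eq_idxOf?, PySem.List.min?]
  | cons a r ih =>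
    by_cases h : a ∈ s
    · -- head is searched: result 0 on both sides
      have h0 : (0 : Int) ∈ s.filterMap (fun x => (PySem.List.index? (a :: r) x).map (fun n => (n : Int))) := by
        refine List.mem_filterMap.2 ⟨a, h, ?_⟩
        rw [PySem.List.index?_cons_self]; rfl
      cases hm : PySem.List.min? (s.filterMap (fun x => (PySem.List.index? (a :: r) x).map (fun n => (n : Int)))) (fun y => y) with
      | none =>
        rw [PySem.List.min?_eq_none_iff] at hm
        rw [hm] at h0; simp at h0
      | some m =>
        have hmem := PySem.List.min?_mem hm
        obtain ⟨x, hx, hmx⟩ := List.mem_filterMap.1 hmem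
        have hm0 : 0 ≤ m := by
          cases hi : PySem.List.index? (a :: r) x with
          | none => rw [hi] at hmx; simp at hmx
          | some n => rw [hi] at hmx; simp at hmx; omega
        have hle := PySem.List.min?_isMin hm 0 h0
        have : m = 0 := le_antisymm hle hm0
        simp [List.findIdx?_cons, h, this]
    · -- head not searched: positions shift by one
      have hne : ∀ x ∈ s, a ≠ x := fun x hx e => h (e ▸ hx)
      have hpos : s.filterMap (fun x => (PySem.List.index? (a :: r) x).map (fun n => (n : Int)))
          = (s.filterMap (fun x => (PySem.List.index? r x).map (fun n => (n : Int)))).map (· + 1) := by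
        have step : ∀ x ∈ s, (PySem.List.index? (a :: r) x).map (fun n => (n : Int))
            = ((PySem.List.index? r x).map (fun n => (n : Int))).map (· + 1) := by
          intro x hx
          rw [PySem.List.index?_cons_of_ne _ (hne x hx)]
          cases PySem.List.index? r x <;> simp
        rw [List.filterMap_congr step, List.map_filterMap]
      simp only [hpos, min?_map_add_one]
      simp only [List.findIdx?_cons]
      have hd : decide (a ∈ s) = false := by simp [h]
      rw [hd]
      cases hr : r.findIdx? (fun x => decide (x ∈ s)) with
      | none =>
        cases hm2 : PySem.List.min? (s.filterMap (fun x => (PySem.List.index? r x).map (fun n => (n : Int)))) (fun y => y) with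
        | none => simp
        | some m =>
          rw [hr, hm2] at ih; simp at ih
          have h0 := positions_nonneg r s m (PySem.List.min?_mem hm2)
          omega
      | some k =>
        cases hm2 : PySem.List.min? (s.filterMap (fun x => (PySem.List.index? r x).map (fun n => (n : Int)))) (fun y => y) with
        | none => rw [hr, hm2] at ih; simp at ih
        | some m =>
          rw [hr, hm2] at ih; simp at ih
          simp [ih]

theorem firstIndex_fold_get? (t : List Int) (x : Int) :
    ∀ (st : Int) (d : PySem.Dict Int Int),
      ((PySem.List.enumerate t st).foldl
        (fun first p => if first.contains p.2 then first else first.insert p.2 p.1) d).get? x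
      = (if d.contains x then d.get? x
         else (PySem.List.index? t x).map (fun n => (n : Int) + st)) := by
  induction t with
  | nil =>
    intro st d
    simp only [PySem.List.enumerate_nil, List.foldl_nil]
    split_ifs with h
    · rfl
    · rw [PySem.List.index?_eq_idxOf?]
      simp [(PySem.Dict.get?_eq_none_iff_contains d x).2 (by simpa using h)]
  | cons a r ih =>
    intro st d
    rw [PySem.List.enumerate_cons, List.foldl_cons]
    by_cases hda : d.contains a = true
    · rw [if_pos hda, ih (st + 1) d]
      by_cases hx : d.contains x = true
      · rw [if_pos hx, if_pos hx]
      · have hax : a ≠ x := by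
          intro e; rw [e] at hda; rw [hda] at hx; simp at hx
        rw [if_neg hx, if_neg hx, PySem.List.index?_cons_of_ne _ hax]
        cases PySem.List.index? r x <;> simp <;> push_cast <;> ring
    · rw [if_neg hda, ih (st + 1) (d.insert a st)]
      by_cases hax : a = x
      · subst hax
        rw [if_pos (PySem.Dict.contains_insert_self d a st), if_neg hda,
            PySem.Dict.get?_insert_self, PySem.List.index?_cons_self]
        simp
      · rw [PySem.Dict.contains_insert, PySem.Dict.get?_insert,
            if_neg (Ne.symm hax), PySem.List.index?_cons_of_ne _ hax]
        have hba : (x == a) = false := by simp [Ne.symm hax]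
        rw [hba, Bool.false_or]
        by_cases hx : d.contains x = true
        · rw [if_pos hx, if_pos hx]
        · rw [if_neg hx, if_neg hx]
          cases PySem.List.index? r x <;> simp <;> push_cast <;> ring

theorem firstIndex_get? (t : List Int) (x : Int) :
    (pvFirstIndex t).get? x = (PySem.List.index? t x).map (fun n => (n : Int)) := by
  rw [pvFirstIndex, firstIndex_fold_get? t x 0 PySem.Dict.empty]
  simp [PySem.Dict.contains_empty]

theorem alt_eq (t s : List Int) :
    posicao_mais_a_esquerda_for_alt t s = (match t.findIdx? (fun x => decide (x ∈ s)) with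
      | some k => (k : Int)
      | none => -1) := by
  rw [posicao_mais_a_esquerda_for_alt]
  simp only [List.filterMap_congr (fun x _ => firstIndex_get? t x)]
  exact min_positions_eq t s

-- ===== VERDICT (by name: the statement is the Claim_ definition above) =====
theorem posicao_mais_a_esquerda_for_spec : Claim_equal_posicao_mais_a_esquerda_for := by
  intro t s _
  unfold Spec_posicao_mais_a_esquerda_for
  rw [posicao_mais_a_esquerda_for, scanA_eq, alt_eq]
  cases t.findIdx? (fun x => decide (x ∈ s)) <;> simp
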